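-- pv_equiv track=rewrite | github.com/robusta-dev/holmesgpt | holmes/plugins/toolsets/azuremonitorlogs/utils.py | map_streams_to_log_analytics_tables
-- ===== SOURCE A (Python) =====
-- from typing import Dict, List, Optional
--
-- def map_streams_to_log_analytics_tables(extension_streams: List[str]) -> Dict[str, str]:
--     """
--     Map Container Insights extension streams to Log Analytics table names.
--
--     Args:
--         extension_streams: List of extension stream names
--
--     Returns:
--         dict: Mapping of stream names to Log Analytics table names
--     """
--     # Common mappings from Container Insights streams to Log Analytics tables
--     stream_to_table_mapping = {
--         "Microsoft-ContainerLog": "ContainerLog",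
--         "Microsoft-ContainerLogV2": "ContainerLogV2",
--         "Microsoft-KubeEvents": "KubeEvents",
--         "Microsoft-KubePodInventory": "KubePodInventory",
--         "Microsoft-KubeNodeInventory": "KubeNodeInventory",
--         "Microsoft-KubeServices": "KubeServices",
--         "Microsoft-Perf": "Perf",
--         "Microsoft-InsightsMetrics": "InsightsMetrics",
--         "Microsoft-ContainerInventory": "ContainerInventory",
--         "Microsoft-ContainerNodeInventory": "ContainerNodeInventory"
--     }
--
--     result = {}
--     for stream in extension_streams:
--         if stream in stream_to_table_mapping:
--             result[stream] = stream_to_table_mapping[stream]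
--         else:
--             # Best guess: remove "Microsoft-" prefix if present
--             table_name = stream.replace("Microsoft-", "") if stream.startswith("Microsoft-") else stream
--             result[stream] = table_name
--
--     return result
-- ===== SOURCE B (Python) =====
-- def map_streams_to_log_analytics_tables(extension_streams):
--     """Map Container Insights extension streams to Log Analytics table names."""
--     # Every known table name is just the stream with its "Microsoft-" prefix
--     # stripped, so no lookup table is needed.
--     return {
--         stream: stream.replace("Microsoft-", "") if stream.startswith("Microsoft-") else stream
--         for stream in extension_streams
--     }
-- ===== Notes on version B (the rewrite author's own statement) =====
-- stated objective: simpler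
-- what changed: B drops the ten-entry stream-to-table lookup dict and the membership-test branch entirely and builds the result with a single dict comprehension that strips the 'Microsoft-' prefix directly, which coincides with every table entry.
import Mathlib
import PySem

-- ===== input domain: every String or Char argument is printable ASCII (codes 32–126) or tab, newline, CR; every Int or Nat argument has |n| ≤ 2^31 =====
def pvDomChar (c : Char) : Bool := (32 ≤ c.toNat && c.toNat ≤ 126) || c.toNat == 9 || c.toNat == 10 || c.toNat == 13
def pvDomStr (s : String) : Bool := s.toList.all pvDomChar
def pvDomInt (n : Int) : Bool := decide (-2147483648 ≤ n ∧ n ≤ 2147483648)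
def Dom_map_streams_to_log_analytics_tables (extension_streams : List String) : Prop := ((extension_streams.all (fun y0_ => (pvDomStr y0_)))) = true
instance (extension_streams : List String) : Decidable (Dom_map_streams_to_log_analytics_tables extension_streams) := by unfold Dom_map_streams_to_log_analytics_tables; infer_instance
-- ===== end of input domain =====

-- B replaces A's ten-entry lookup table + membership branch by directly stripping the
-- "Microsoft-" prefix for every stream (the table's values all equal the stripped stream).

-- ===== PORT A =====
def pvTableA : PySem.Dict String String := PySem.Dict.ofList
  [("Microsoft-ContainerLog", "ContainerLog"),
   ("Microsoft-ContainerLogV2", "ContainerLogV2"),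
   ("Microsoft-KubeEvents", "KubeEvents"),
   ("Microsoft-KubePodInventory", "KubePodInventory"),
   ("Microsoft-KubeNodeInventory", "KubeNodeInventory"),
   ("Microsoft-KubeServices", "KubeServices"),
   ("Microsoft-Perf", "Perf"),
   ("Microsoft-InsightsMetrics", "InsightsMetrics"),
   ("Microsoft-ContainerInventory", "ContainerInventory"),
   ("Microsoft-ContainerNodeInventory", "ContainerNodeInventory")]

def map_streams_to_log_analytics_tables (extension_streams : List String) : List (String × String) :=
  (extension_streams.foldl
    (fun result stream =>
      if pvTableA.contains stream then
        result.insert stream (pvTableA.getD stream "")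
      else
        let table_name := if PySem.Str.startswith stream "Microsoft-"
                          then PySem.Str.replace stream "Microsoft-" "" else stream
        result.insert stream table_name)
    PySem.Dict.empty).items

-- ===== PORT B =====
def map_streams_to_log_analytics_tables_alt (extension_streams : List String) : List (String × String) :=
  -- dict comprehension: insert each (stream, stripped) pair in order
  (extension_streams.foldl
    (fun d stream =>
      d.insert stream (if PySem.Str.startswith stream "Microsoft-"
                       then PySem.Str.replace stream "Microsoft-" "" else stream))
    PySem.Dict.empty).items

-- ===== PRECONDITION & SPEC =====
def Spec_map_streams_to_log_analytics_tables (extension_streams : List String) (out : List (String × String)) : Prop := out = map_streams_to_log_analytics_tables_alt extension_streams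
instance (extension_streams : List String) (out : List (String × String)) : Decidable (Spec_map_streams_to_log_analytics_tables extension_streams out) := by unfold Spec_map_streams_to_log_analytics_tables; infer_instance

-- ===== CLAIM (what is proved, stated in full; the proofs are below) =====
def Claim_equal_map_streams_to_log_analytics_tables : Prop := ∀ (extension_streams : List String), Dom_map_streams_to_log_analytics_tables extension_streams → Spec_map_streams_to_log_analytics_tables extension_streams (map_streams_to_log_analytics_tables extension_streams)

-- ===== LEMMAS AND PROOFS =====

-- per-element agreement: A's chosen value equals B's stripped value, for every stream
theorem pvVal_eq (s : String) :
    (if pvTableA.contains s then pvTableA.getD s ""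
     else if PySem.Str.startswith s "Microsoft-" then PySem.Str.replace s "Microsoft-" "" else s)
    = (if PySem.Str.startswith s "Microsoft-" then PySem.Str.replace s "Microsoft-" "" else s) := by
  by_cases h : pvTableA.contains s = true
  · -- s is one of the ten literal keys; check each
    have hk : s ∈ pvTableA.keys := by
      simpa using (PySem.Dict.contains_iff_mem_keys (d := pvTableA) (k := s)).mp h
    simp only [pvTableA, PySem.Dict.ofList, PySem.Dict.keys] at hk
    simp only [h, if_true]
    fin_cases hk <;> decide
  · simp [h]

theorem pvFold_eq (xs : List String) (d : PySem.Dict String String) :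
    xs.foldl
      (fun result stream =>
        if pvTableA.contains stream then
          result.insert stream (pvTableA.getD stream "")
        else
          let table_name := if PySem.Str.startswith stream "Microsoft-"
                            then PySem.Str.replace stream "Microsoft-" "" else stream
          result.insert stream table_name) d
    = xs.foldl
        (fun d stream =>
          d.insert stream (if PySem.Str.startswith stream "Microsoft-"
                           then PySem.Str.replace stream "Microsoft-" "" else stream)) d := by
  induction xs generalizing d with
  | nil => rfl
  | cons x xs ih =>
    simp only [List.foldl_cons]
    rw [show (if pvTableA.contains x then d.insert x (pvTableA.getD x "")
          else let table_name := if PySem.Str.startswith x "Microsoft-"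
                                 then PySem.Str.replace x "Microsoft-" "" else x
               d.insert x table_name)
        = d.insert x (if PySem.Str.startswith x "Microsoft-"
                      then PySem.Str.replace x "Microsoft-" "" else x) from by
      have := pvVal_eq x
      split_ifs at this ⊢ <;> simp_all]
    exact ih _

-- ===== VERDICT (by name: the statement is the Claim_ definition above) =====
theorem map_streams_to_log_analytics_tables_spec : Claim_equal_map_streams_to_log_analytics_tables := by
  intro xs _
  unfold Spec_map_streams_to_log_analytics_tables map_streams_to_log_analytics_tables map_streams_to_log_analytics_tables_alt
  rw [pvFold_eq]
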